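-- pv_equiv track=rewrite | github.com/RESMP-DEV/metal-marlin | metal_marlin/guided/grammar.py | _parse_rhs
-- ===== SOURCE A (Python) =====
-- def _parse_rhs(text: str) -> list[str]:
--     """Parse right-hand side of a production rule.
--
--     Handles:
--     - Quoted strings: "text" or 'text'
--     - Non-terminals: <name>
--     - Character classes: [a-z]
--     - Bare words (terminals)
--     """
--     symbols: list[str] = []
--     i = 0
--     n = len(text)
--
--     while i < n:
--         # Skip whitespace
--         while i < n and text[i].isspace():
--             i += 1
--         if i >= n:
--             break
--
--         if text[i] == '"' or text[i] == "'":
--             # Quoted string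
--             quote = text[i]
--             i += 1
--             start = i
--             while i < n and text[i] != quote:
--                 if text[i] == '\\':
--                     i += 2
--                 else:
--                     i += 1
--             symbols.append(text[start:i])
--             i += 1  # Skip closing quote
--
--         elif text[i] == '<':
--             # Non-terminal
--             start = i
--             while i < n and text[i] != '>':
--                 i += 1
--             symbols.append(text[start:i + 1])
--             i += 1
--
--         elif text[i] == '[':
--             # Character class
--             start = i
--             while i < n and text[i] != ']':
--                 i += 1
--             symbols.append(text[start:i + 1])
--             i += 1
--
--         elif text[i] == '\\':
--             # Escape sequence (\d, \w, etc.)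
--             symbols.append(text[i:i + 2])
--             i += 2
--
--         elif text[i] == '.':
--             # Any character
--             symbols.append('.')
--             i += 1
--
--         else:
--             # Bare word
--             start = i
--             while i < n and not text[i].isspace() and text[i] not in '"\'<>[].\\|':
--                 i += 1
--             if start < i:
--                 symbols.append(text[start:i])
--
--     return symbols
-- ===== SOURCE B (Python) =====
-- # Single-pass character DFA (state machine with an accumulator buffer) instead of
-- # an index scanner with nested inner loops; also total on stray '>', ']', '|',
-- # where A loops forever (those inputs are outside the claimed precondition).
--
-- _WS = 0; _WORD = 1; _QUOTE = 2; _QESC = 3; _ANGLE = 4; _BRACKET = 5; _ESC = 6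
--
--
-- def _dispatch(c, q, out):
--     """Handle character c seen at top level; return (state, quote, buf)."""
--     if c.isspace():
--         return _WS, q, []
--     if c == '"' or c == "'":
--         return _QUOTE, c, []
--     if c == '<':
--         return _ANGLE, q, [c]
--     if c == '[':
--         return _BRACKET, q, [c]
--     if c == '\\':
--         return _ESC, q, []
--     if c == '.':
--         out.append('.')
--         return _WS, q, []
--     if c == '>' or c == ']' or c == '|':
--         out.append(c)  # stray punctuation: its own token (A never returns here)
--         return _WS, q, []
--     return _WORD, q, [c]
--
--
-- def _parse_rhs(text: str) -> list[str]:
--     out: list[str] = []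
--     state, q, buf = _WS, '', []
--     for c in text:
--         if state == _QUOTE:
--             if c == '\\':
--                 buf.append(c); state = _QESC
--             elif c == q:
--                 out.append(''.join(buf)); state, buf = _WS, []
--             else:
--                 buf.append(c)
--         elif state == _QESC:
--             buf.append(c); state = _QUOTE
--         elif state == _ANGLE:
--             buf.append(c)
--             if c == '>':
--                 out.append(''.join(buf)); state, buf = _WS, []
--         elif state == _BRACKET:
--             buf.append(c)
--             if c == ']':
--                 out.append(''.join(buf)); state, buf = _WS, []
--         elif state == _ESC:
--             out.append('\\' + c); state = _WS
--         elif state == _WORD and not c.isspace() and c not in '"\'<>[].\\|':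
--             buf.append(c)
--         else:  # _WS, or a character that terminates a bare word
--             if state == _WORD:
--                 out.append(''.join(buf))
--             state, q, buf = _dispatch(c, q, out)
--     # end of input: flush whatever is open
--     if state == _ESC:
--         out.append('\\')
--     elif state != _WS:
--         out.append(''.join(buf))
--     return out
-- ===== Notes on version B (the rewrite author's own statement) =====
-- stated objective: alternative
-- what changed: Replaced the index-based scanner with nested inner while-loops and slicing by a single-pass character-driven state machine (DFA with an accumulator buffer); Pre_ now excludes exactly the inputs on which A loops forever (a stray '>', ']' or '|' reached at top level) and equivalence is proved on everything else, including <name> and [class].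
-- outside the precondition, e.g. on _parse_rhs('>'): A does not finish within the time limit, B returns ['>']; on _parse_rhs(']'): A does not finish within the time limit, B returns [']']; on _parse_rhs('|'): A does not finish within the time limit, B returns ['|']
import Mathlib
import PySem

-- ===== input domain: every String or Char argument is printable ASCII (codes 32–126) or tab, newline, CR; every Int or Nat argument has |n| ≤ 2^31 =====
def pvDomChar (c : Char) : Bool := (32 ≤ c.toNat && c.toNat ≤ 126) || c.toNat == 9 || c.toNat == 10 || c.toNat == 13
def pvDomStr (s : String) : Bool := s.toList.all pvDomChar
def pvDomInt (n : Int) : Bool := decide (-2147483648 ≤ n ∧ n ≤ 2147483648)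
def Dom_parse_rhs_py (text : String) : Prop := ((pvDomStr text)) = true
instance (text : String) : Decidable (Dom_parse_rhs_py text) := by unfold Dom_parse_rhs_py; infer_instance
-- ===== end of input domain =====

-- B replaces A's index scanner (nested inner while-loops plus slicing) by a single-pass
-- character-driven state machine; same outputs on every input of Pre_ (A loops forever outside it).

-- ===== PORT A =====
-- characters that terminate a bare word  ('"\'<>[].\\|' in A)
def pvBreakChars : List Char := ['"', '\'', '<', '>', '[', ']', '.', '\\', '|']

-- while i < n and text[i].isspace(): i += 1
def pvSkipWs (cs : List Char) (i : Nat) : Nat :=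
  if h : i < cs.length then
    if PySem.Chars.isspace cs[i] then pvSkipWs cs (i + 1) else i
  else i
termination_by cs.length - i

-- while i < n and text[i] != quote: i += 2 on '\\' else i += 1
def pvScanQuote (cs : List Char) (q : Char) (i : Nat) : Nat :=
  if h : i < cs.length then
    if cs[i] = q then i
    else if cs[i] = '\\' then pvScanQuote cs q (i + 2)
    else pvScanQuote cs q (i + 1)
  else i
termination_by cs.length - i
decreasing_by all_goals omega

-- while i < n and text[i] != t: i += 1   (t = '>' or ']')
def pvScanTo (cs : List Char) (t : Char) (i : Nat) : Nat :=
  if h : i < cs.length then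
    if cs[i] = t then i else pvScanTo cs t (i + 1)
  else i
termination_by cs.length - i

-- while i < n and not text[i].isspace() and text[i] not in '"\'<>[].\\|': i += 1
def pvScanWord (cs : List Char) (i : Nat) : Nat :=
  if h : i < cs.length then
    if ¬ PySem.Chars.isspace cs[i] ∧ cs[i] ∉ pvBreakChars then pvScanWord cs (i + 1) else i
  else i
termination_by cs.length - i

-- the outer 'while i < n' loop of A; fuel only for Lean totality (A diverges outside Pre_,
-- inside Pre_ the loop runs at most n+1 times and the fuel is never exhausted)
def pvLoopA (cs : List Char) (fuel : Nat) (i : Nat) (acc : List String) : List String :=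
  match fuel with
  | 0 => acc
  | fuel + 1 =>
    if h : i < cs.length then
      let i1 := pvSkipWs cs i
      if h1 : i1 < cs.length then
        let c := cs[i1]
        if c = '"' ∨ c = '\'' then
          let j := pvScanQuote cs c (i1 + 1)
          pvLoopA cs fuel (j + 1)
            (acc ++ [String.ofList ((cs.drop (i1 + 1)).take (j - (i1 + 1)))])
        else if c = '<' then
          let j := pvScanTo cs '>' i1
          pvLoopA cs fuel (j + 1) (acc ++ [String.ofList ((cs.drop i1).take (j + 1 - i1))])
        else if c = '[' then
          let j := pvScanTo cs ']' i1
          pvLoopA cs fuel (j + 1) (acc ++ [String.ofList ((cs.drop i1).take (j + 1 - i1))])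
        else if c = '\\' then
          pvLoopA cs fuel (i1 + 2) (acc ++ [String.ofList ((cs.drop i1).take 2)])
        else if c = '.' then
          pvLoopA cs fuel (i1 + 1) (acc ++ ["."])
        else
          let j := pvScanWord cs i1
          pvLoopA cs fuel j
            (if i1 < j then acc ++ [String.ofList ((cs.drop i1).take (j - i1))] else acc)
      else acc
    else acc

def parse_rhs_py (text : String) : List String :=
  pvLoopA text.toList (text.toList.length + 1) 0 []

-- ===== PORT B =====
inductive PvSt where
  | ws | word | quote | qesc | angle | bracket | esc
deriving DecidableEq, Repr

-- top-level dispatch of one character (helper _dispatch in Source B); returns (state, quote, buf, out)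
def pvDispatch (c : Char) (q : Char) (out : List String) : PvSt × Char × List Char × List String :=
  if PySem.Chars.isspace c then (.ws, q, [], out)
  else if c = '"' ∨ c = '\'' then (.quote, c, [], out)
  else if c = '<' then (.angle, q, [c], out)
  else if c = '[' then (.bracket, q, [c], out)
  else if c = '\\' then (.esc, q, [], out)
  else if c = '.' then (.ws, q, [], out ++ ["."])
  else if c = '>' ∨ c = ']' ∨ c = '|' then (.ws, q, [], out ++ [String.ofList [c]])
  else (.word, q, [c], out)

-- one DFA transition (the body of Source B's for-loop)
def pvStep (s : PvSt × Char × List Char × List String) (c : Char) :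
    PvSt × Char × List Char × List String :=
  let (st, q, buf, out) := s
  match st with
  | .quote =>
    if c = '\\' then (.qesc, q, buf ++ [c], out)
    else if c = q then (.ws, q, [], out ++ [String.ofList buf])
    else (.quote, q, buf ++ [c], out)
  | .qesc => (.quote, q, buf ++ [c], out)
  | .angle =>
    if c = '>' then (.ws, q, [], out ++ [String.ofList (buf ++ [c])])
    else (.angle, q, buf ++ [c], out)
  | .bracket =>
    if c = ']' then (.ws, q, [], out ++ [String.ofList (buf ++ [c])])
    else (.bracket, q, buf ++ [c], out)
  | .esc => (.ws, q, [], out ++ [String.ofList ['\\', c]])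
  | .word =>
    if ¬ PySem.Chars.isspace c ∧ c ∉ pvBreakChars then (.word, q, buf ++ [c], out)
    else pvDispatch c q (out ++ [String.ofList buf])
  | .ws => pvDispatch c q out

-- end-of-input flush
def pvFlush (s : PvSt × Char × List Char × List String) : List String :=
  let (st, _, buf, out) := s
  match st with
  | .ws => out
  | .esc => out ++ ["\\"]
  | _ => out ++ [String.ofList buf]

def parse_rhs_py_alt (text : String) : List String :=
  pvFlush (text.toList.foldl pvStep (.ws, ' ', [], []))

-- ===== PRECONDITION & SPEC =====
-- States of the acceptor deciding Pre_ (it computes no output; used only by Pre_).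
inductive PvAccSt where
  | top | quote : Char → PvAccSt | qesc : Char → PvAccSt | angle | bracket | esc
deriving DecidableEq, Repr

-- Membership in the regular language (ws | "…" | '…' | <…> | […] | \x | . | word)* of
-- texts whose scan never meets a '>', ']' or '|' at top level; decided by this
-- six-state acceptor (the minimal description of that regular language).
def pvOk : PvAccSt → List Char → Bool
  | _, [] => true
  | .top, c :: rest =>
    if PySem.Chars.isspace c then pvOk .top rest
    else if c = '"' ∨ c = '\'' then pvOk (.quote c) rest
    else if c = '<' then pvOk .angle rest
    else if c = '[' then pvOk .bracket rest
    else if c = '\\' then pvOk .esc rest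
    else if c = '.' then pvOk .top rest
    else if c = '>' ∨ c = ']' ∨ c = '|' then false
    else pvOk .top rest
  | .quote q, c :: rest =>
    if c = '\\' then pvOk (.qesc q) rest
    else if c = q then pvOk .top rest
    else pvOk (.quote q) rest
  | .qesc q, _ :: rest => pvOk (.quote q) rest
  | .angle, c :: rest => if c = '>' then pvOk .top rest else pvOk .angle rest
  | .bracket, c :: rest => if c = ']' then pvOk .top rest else pvOk .bracket rest
  | .esc, _ :: rest => pvOk .top rest

-- Pre_ excludes exactly the texts on which A LOOPS FOREVER: those whose scan reaches a
-- stray '>', ']' or '|' at top level (outside a quote, <...>, [...] or escape); every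
-- input on which A returns — including <name> and [class] — satisfies Pre_.
def Pre_parse_rhs_py (text : String) : Prop := pvOk .top text.toList = true
instance (text : String) : Decidable (Pre_parse_rhs_py text) := by
  unfold Pre_parse_rhs_py; infer_instance

def pvWitness_parse_rhs_py : String := "\"a b\" <x> [0-9] \\d . qq"

def Spec_parse_rhs_py (text : String) (out : List String) : Prop := out = parse_rhs_py_alt text
instance (text : String) (out : List String) : Decidable (Spec_parse_rhs_py text out) := by
  unfold Spec_parse_rhs_py; infer_instance

-- ===== CLAIM (what is proved, stated in full; the proofs are below) =====
def Claim_equal_parse_rhs_py : Prop :=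
  ∀ (text : String), Dom_parse_rhs_py text → Pre_parse_rhs_py text →
    Spec_parse_rhs_py text (parse_rhs_py text)

-- ===== LEMMAS AND PROOFS =====

-- abbreviation used only by the proofs: run the DFA over l from state s and flush
def pvRun (s : PvSt × Char × List Char × List String) (l : List Char) : List String :=
  pvFlush (l.foldl pvStep s)

theorem pvSkipWs_ge (cs : List Char) (i : Nat) : i ≤ pvSkipWs cs i := by
  fun_induction pvSkipWs cs i <;> omega

theorem pvScanQuote_ge (cs : List Char) (q : Char) (i : Nat) : i ≤ pvScanQuote cs q i := by
  fun_induction pvScanQuote cs q i <;> omega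

theorem pvScanTo_ge (cs : List Char) (t : Char) (i : Nat) : i ≤ pvScanTo cs t i := by
  fun_induction pvScanTo cs t i <;> omega

theorem pvScanWord_ge (cs : List Char) (i : Nat) : i ≤ pvScanWord cs i := by
  fun_induction pvScanWord cs i <;> omega

theorem pvSkipWs_stop (cs : List Char) (i : Nat) (h : pvSkipWs cs i < cs.length) :
    ¬ PySem.Chars.isspace (cs[pvSkipWs cs i]'h) := by
  fun_induction pvSkipWs cs i with
  | case1 i hi hsp ih => exact ih h
  | case2 i hi hsp => exact hsp
  | case3 i hi => omega

theorem drop_cons_of_lt (cs : List Char) (i : Nat) (h : i < cs.length) :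
    cs.drop i = cs[i] :: cs.drop (i + 1) := by
  exact List.drop_eq_getElem_cons h

theorem drop_eq_nil_of_ge (cs : List Char) (i : Nat) (h : cs.length ≤ i) :
    cs.drop i = [] := by simp [h]

-- unfolding equations for single DFA transitions
theorem step_ws (q : Char) (out : List String) (c : Char) :
    pvStep (.ws, q, [], out) c = pvDispatch c q out := rfl

theorem step_quote (q : Char) (buf : List Char) (out : List String) (c : Char) :
    pvStep (.quote, q, buf, out) c =
      (if c = '\\' then (.qesc, q, buf ++ [c], out)
       else if c = q then (.ws, q, [], out ++ [String.ofList buf])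
       else (.quote, q, buf ++ [c], out)) := rfl

theorem step_qesc (q : Char) (buf : List Char) (out : List String) (c : Char) :
    pvStep (.qesc, q, buf, out) c = (.quote, q, buf ++ [c], out) := rfl

theorem step_esc (q : Char) (buf : List Char) (out : List String) (c : Char) :
    pvStep (.esc, q, buf, out) c = (.ws, q, [], out ++ [String.ofList ['\\', c]]) := rfl

theorem step_word (q : Char) (buf : List Char) (out : List String) (c : Char) :
    pvStep (.word, q, buf, out) c =
      (if ¬ PySem.Chars.isspace c ∧ c ∉ pvBreakChars then (.word, q, buf ++ [c], out)
       else pvDispatch c q (out ++ [String.ofList buf])) := rfl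

-- skipping whitespace keeps the DFA in the ws state
theorem pvRun_ws (cs : List Char) (i : Nat) (q : Char) (out : List String) :
    pvRun (.ws, q, [], out) (cs.drop i) = pvRun (.ws, q, [], out) (cs.drop (pvSkipWs cs i)) := by
  fun_induction pvSkipWs cs i with
  | case1 i h hsp ih =>
    rw [drop_cons_of_lt cs i h, ← ih]
    have e : pvStep (.ws, q, [], out) cs[i] = (.ws, q, [], out) := by
      rw [step_ws]; unfold pvDispatch; rw [if_pos hsp]
    simp only [pvRun, List.foldl_cons, e]
  | case2 => rfl
  | case3 => rfl

-- skipping whitespace keeps the acceptor in the top state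
theorem pvOk_ws (cs : List Char) (i : Nat) :
    pvOk .top (cs.drop i) = pvOk .top (cs.drop (pvSkipWs cs i)) := by
  fun_induction pvSkipWs cs i with
  | case1 i h hsp ih =>
    rw [drop_cons_of_lt cs i h, ← ih, pvOk, if_pos hsp]
  | case2 => rfl
  | case3 => rfl

-- the quoted-string region: A's scan and the DFA's quote/qesc states agree
theorem pvRun_quote (cs : List Char) (q : Char) (hq : q ≠ '\\') (i : Nat)
    (buf : List Char) (out : List String) :
    pvRun (.quote, q, buf, out) (cs.drop i) =
      pvRun (.ws, q, [], out ++ [String.ofList (buf ++ (cs.drop i).take (pvScanQuote cs q i - i))])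
        (cs.drop (pvScanQuote cs q i + 1)) := by
  fun_induction pvScanQuote cs q i generalizing buf out with
  | case1 i h heq =>
    rw [drop_cons_of_lt cs i h]
    have e : pvStep (.quote, q, buf, out) cs[i] = (.ws, q, [], out ++ [String.ofList buf]) := by
      rw [step_quote, if_neg (by rw [heq]; exact hq), if_pos heq]
    simp only [pvRun, List.foldl_cons, e]
    congr 3
    simp
  | case2 i h heq hbs ih =>
    have hge := pvScanQuote_ge cs q (i + 2)
    by_cases h2 : i + 1 < cs.length
    · rw [drop_cons_of_lt cs i h, drop_cons_of_lt cs (i + 1) h2]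
      have e1 : pvStep (.quote, q, buf, out) cs[i] = (.qesc, q, buf ++ [cs[i]], out) := by
        rw [step_quote, if_pos hbs]
      simp only [pvRun, List.foldl_cons, e1, step_qesc]
      have := ih (buf ++ [cs[i]] ++ [cs[i + 1]]) out
      simp only [pvRun] at this
      rw [show i + 1 + 1 = i + 2 from rfl, this]
      congr 3
      rw [show pvScanQuote cs q (i + 2) - i = (pvScanQuote cs q (i + 2) - (i + 2)) + 1 + 1
        from by omega, List.take_succ_cons, List.take_succ_cons]
      simp
    · -- '\\' is the last character: the scan overruns the end
      have hlen : cs.length = i + 1 := by omega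
      have hstop : pvScanQuote cs q (i + 2) = i + 2 := by
        rw [pvScanQuote]; simp [hlen]
      rw [hstop, drop_cons_of_lt cs i h,
        drop_eq_nil_of_ge cs (i + 1) (by omega), drop_eq_nil_of_ge cs (i + 2 + 1) (by omega)]
      have e1 : pvStep (.quote, q, buf, out) cs[i] = (.qesc, q, buf ++ [cs[i]], out) := by
        rw [step_quote, if_pos hbs]
      simp only [pvRun, List.foldl_cons, List.foldl_nil, e1]
      simp [pvFlush, show i + 2 - i = 2 from by omega]
  | case3 i h heq hbs ih =>
    have hge := pvScanQuote_ge cs q (i + 1)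
    rw [drop_cons_of_lt cs i h]
    have e1 : pvStep (.quote, q, buf, out) cs[i] = (.quote, q, buf ++ [cs[i]], out) := by
      rw [step_quote, if_neg hbs, if_neg heq]
    simp only [pvRun, List.foldl_cons, e1]
    have := ih (buf ++ [cs[i]]) out
    simp only [pvRun] at this
    rw [this]
    congr 3
    rw [show pvScanQuote cs q (i + 1) - i = (pvScanQuote cs q (i + 1) - (i + 1)) + 1 from by omega,
      List.take_succ_cons]
    simp
  | case4 i h =>
    rw [drop_eq_nil_of_ge cs i (by omega), drop_eq_nil_of_ge cs (i + 1) (by omega)]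
    simp [pvRun, pvFlush]

-- the quoted-string region preserves acceptance
theorem pvOk_quote (cs : List Char) (q : Char) (hq : q ≠ '\\') (i : Nat)
    (hok : pvOk (.quote q) (cs.drop i) = true) :
    pvOk .top (cs.drop (pvScanQuote cs q i + 1)) = true := by
  fun_induction pvScanQuote cs q i with
  | case1 i h heq =>
    rw [drop_cons_of_lt cs i h, pvOk, if_neg (by rw [heq]; exact hq), if_pos heq] at hok
    exact hok
  | case2 i h heq hbs ih =>
    rw [drop_cons_of_lt cs i h, pvOk, if_pos hbs] at hok
    by_cases h2 : i + 1 < cs.length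
    · rw [drop_cons_of_lt cs (i + 1) h2, pvOk] at hok
      exact ih hok
    · have hstop : pvScanQuote cs q (i + 2) = i + 2 := by
        rw [pvScanQuote]; simp [show ¬ i + 2 < cs.length from by omega]
      rw [hstop, drop_eq_nil_of_ge cs (i + 2 + 1) (by omega)]
      rfl
  | case3 i h heq hbs ih =>
    rw [drop_cons_of_lt cs i h, pvOk, if_neg hbs, if_neg heq] at hok
    exact ih hok
  | case4 i h =>
    rw [drop_eq_nil_of_ge cs (i + 1) (by omega)]
    rfl

-- the non-terminal / character-class region ('<'…'>' and '['…']')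
theorem pvRun_angle (cs : List Char) (t : Char) (st : PvSt) (q : Char)
    (hstep : ∀ buf out c, pvStep (st, q, buf, out) c =
      (if c = t then (.ws, q, [], out ++ [String.ofList (buf ++ [c])])
       else (st, q, buf ++ [c], out)))
    (hfl : ∀ buf out, pvFlush (st, q, buf, out) = out ++ [String.ofList buf])
    (i : Nat) (buf : List Char) (out : List String) :
    pvRun (st, q, buf, out) (cs.drop i) =
      pvRun (.ws, q, [], out ++ [String.ofList (buf ++ (cs.drop i).take (pvScanTo cs t i + 1 - i))])
        (cs.drop (pvScanTo cs t i + 1)) := by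
  fun_induction pvScanTo cs t i generalizing buf out with
  | case1 i h heq =>
    rw [drop_cons_of_lt cs i h]
    simp only [pvRun, List.foldl_cons, hstep, heq, if_true]
    congr 3
    simp [show i + 1 - i = 1 from by omega, heq]
  | case2 i h heq ih =>
    have hge := pvScanTo_ge cs t (i + 1)
    rw [drop_cons_of_lt cs i h]
    simp only [pvRun, List.foldl_cons, hstep, heq, if_false]
    have := ih (buf ++ [cs[i]]) out
    simp only [pvRun] at this
    rw [this]
    congr 3
    rw [show pvScanTo cs t (i + 1) + 1 - i = (pvScanTo cs t (i + 1) + 1 - (i + 1)) + 1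
      from by omega, List.take_succ_cons]
    simp
  | case3 i h =>
    rw [drop_eq_nil_of_ge cs i (by omega), drop_eq_nil_of_ge cs (i + 1) (by omega)]
    simp only [pvRun, List.foldl_nil, hfl]
    simp [pvFlush]

-- the '<'…'>' / '['…']' regions preserve acceptance
theorem pvOk_angle (cs : List Char) (t : Char) (st : PvAccSt)
    (hstep : ∀ c rest, pvOk st (c :: rest) =
      (if c = t then pvOk .top rest else pvOk st rest))
    (i : Nat) (hok : pvOk st (cs.drop i) = true) :
    pvOk .top (cs.drop (pvScanTo cs t i + 1)) = true := by
  fun_induction pvScanTo cs t i with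
  | case1 i h heq =>
    rw [drop_cons_of_lt cs i h, hstep, if_pos heq] at hok
    exact hok
  | case2 i h heq ih =>
    rw [drop_cons_of_lt cs i h, hstep, if_neg heq] at hok
    exact ih hok
  | case3 i h =>
    rw [drop_eq_nil_of_ge cs (i + 1) (by omega)]
    rfl

-- the bare-word region
theorem pvRun_word (cs : List Char) (q : Char) (i : Nat) (buf : List Char) (out : List String) :
    pvRun (.word, q, buf, out) (cs.drop i) =
      pvRun (.ws, q, [], out ++ [String.ofList (buf ++ (cs.drop i).take (pvScanWord cs i - i))])
        (cs.drop (pvScanWord cs i)) := by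
  fun_induction pvScanWord cs i generalizing buf out with
  | case1 i h hcond ih =>
    have hge := pvScanWord_ge cs (i + 1)
    rw [drop_cons_of_lt cs i h]
    have e : pvStep (.word, q, buf, out) cs[i] = (.word, q, buf ++ [cs[i]], out) := by
      rw [step_word, if_pos hcond]
    simp only [pvRun, List.foldl_cons, e]
    have := ih (buf ++ [cs[i]]) out
    simp only [pvRun] at this
    rw [this]
    congr 3
    rw [show pvScanWord cs (i + 1) - i = (pvScanWord cs (i + 1) - (i + 1)) + 1 from by omega,
      List.take_succ_cons]
    simp
  | case2 i h hcond =>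
    rw [drop_cons_of_lt cs i h]
    have e : pvStep (.word, q, buf, out) cs[i] = pvDispatch cs[i] q (out ++ [String.ofList buf]) := by
      rw [step_word, if_neg hcond]
    simp only [pvRun, List.foldl_cons, e, step_ws]
    rw [show (cs[i] :: cs.drop (i + 1)).take (i - i) = [] from by simp]
    simp only [List.append_nil]
  | case3 i h =>
    rw [drop_eq_nil_of_ge cs i (by omega)]
    simp [pvRun, pvFlush]

-- word characters keep the acceptor in the top state
theorem pvOk_word (cs : List Char) (i : Nat) :
    pvOk .top (cs.drop i) = pvOk .top (cs.drop (pvScanWord cs i)) := by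
  fun_induction pvScanWord cs i with
  | case1 i h hcond ih =>
    rw [drop_cons_of_lt cs i h, ← ih]
    have hnb := hcond.2
    simp only [pvBreakChars, List.mem_cons, List.not_mem_nil, or_false] at hnb
    push_neg at hnb
    obtain ⟨b1, b2, b3, b4, b5, b6, b7, b8, b9⟩ := hnb
    rw [pvOk, if_neg hcond.1, if_neg (by tauto), if_neg b3, if_neg b5, if_neg b8,
      if_neg b7, if_neg (by tauto)]
  | case2 => rfl
  | case3 => rfl

-- main loop invariant: A's outer loop from index i equals running the DFA on the suffix
theorem pvLoopA_eq_run (cs : List Char) :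
    ∀ fuel i acc q, cs.length - i < fuel → pvOk .top (cs.drop i) = true →
      pvLoopA cs fuel i acc = pvRun (.ws, q, [], acc) (cs.drop i) := by
  intro fuel
  induction fuel with
  | zero => intro i acc q h; omega
  | succ fuel ih =>
    intro i acc q hfuel hok
    rw [pvLoopA]
    by_cases h : i < cs.length
    · simp only [dif_pos h]
      rw [pvRun_ws cs i q acc]
      rw [pvOk_ws cs i] at hok
      set i1 := pvSkipWs cs i with hi1
      have hge1 : i ≤ i1 := pvSkipWs_ge cs i
      by_cases h1 : i1 < cs.length
      · simp only [dif_pos h1]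
        rw [drop_cons_of_lt cs i1 h1]
        rw [drop_cons_of_lt cs i1 h1] at hok
        by_cases hqc : cs[i1] = '"' ∨ cs[i1] = '\''
        · rw [if_pos hqc]
          have hsp : ¬ PySem.Chars.isspace cs[i1] := by
            rcases hqc with h' | h' <;> rw [h'] <;> decide
          rw [pvOk, if_neg hsp, if_pos hqc] at hok
          have hstep : pvStep (.ws, q, [], acc) cs[i1] = (.quote, cs[i1], [], acc) := by
            rw [step_ws]; unfold pvDispatch
            rw [if_neg hsp, if_pos hqc]
          simp only [pvRun, List.foldl_cons, hstep]
          have hqbs : cs[i1] ≠ '\\' := by rcases hqc with h' | h' <;> rw [h'] <;> decide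
          have hrq := pvRun_quote cs cs[i1] hqbs (i1 + 1) [] acc
          simp only [pvRun] at hrq
          rw [hrq]
          have hgej := pvScanQuote_ge cs cs[i1] (i1 + 1)
          have hok' := pvOk_quote cs cs[i1] hqbs (i1 + 1) hok
          rw [ih (pvScanQuote cs cs[i1] (i1 + 1) + 1) _ cs[i1] (by omega) hok']
          simp [pvRun]
        · rw [if_neg hqc]
          push_neg at hqc
          have hsp : ¬ PySem.Chars.isspace cs[i1] := pvSkipWs_stop cs i h1
          by_cases hlt : cs[i1] = '<'
          · rw [if_pos hlt]
            rw [pvOk, if_neg hsp, if_neg (by tauto), if_pos hlt] at hok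
            have hstep : pvStep (.ws, q, [], acc) cs[i1] = (.angle, q, [cs[i1]], acc) := by
              rw [step_ws]; unfold pvDispatch
              rw [if_neg hsp, if_neg (by tauto), if_pos hlt]
            simp only [pvRun, List.foldl_cons, hstep]
            have hrun := pvRun_angle cs '>' .angle q (fun buf out c => rfl) (fun buf out => rfl)
              (i1 + 1) [cs[i1]] acc
            simp only [pvRun] at hrun
            rw [hrun]
            have hgej := pvScanTo_ge cs '>' (i1 + 1)
            have hto : pvScanTo cs '>' i1 = pvScanTo cs '>' (i1 + 1) := by
              rw [pvScanTo, dif_pos h1, if_neg (by rw [hlt]; decide)]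
            have hok' := pvOk_angle cs '>' .angle (fun c rest => rfl) (i1 + 1) hok
            rw [hto, ih (pvScanTo cs '>' (i1 + 1) + 1) _ q (by omega) hok']
            congr 3
            rw [show pvScanTo cs '>' (i1 + 1) + 1 - i1
                = (pvScanTo cs '>' (i1 + 1) + 1 - (i1 + 1)) + 1 from by omega,
              List.take_succ_cons]
            simp
          · rw [if_neg hlt]
            by_cases hbk : cs[i1] = '['
            · rw [if_pos hbk]
              rw [pvOk, if_neg hsp, if_neg (by tauto), if_neg hlt, if_pos hbk] at hok
              have hstep : pvStep (.ws, q, [], acc) cs[i1] = (.bracket, q, [cs[i1]], acc) := by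
                rw [step_ws]; unfold pvDispatch
                rw [if_neg hsp, if_neg (by tauto), if_neg hlt, if_pos hbk]
              simp only [pvRun, List.foldl_cons, hstep]
              have hrun := pvRun_angle cs ']' .bracket q (fun buf out c => rfl)
                (fun buf out => rfl) (i1 + 1) [cs[i1]] acc
              simp only [pvRun] at hrun
              rw [hrun]
              have hgej := pvScanTo_ge cs ']' (i1 + 1)
              have hto : pvScanTo cs ']' i1 = pvScanTo cs ']' (i1 + 1) := by
                rw [pvScanTo, dif_pos h1, if_neg (by rw [hbk]; decide)]
              have hok' := pvOk_angle cs ']' .bracket (fun c rest => rfl) (i1 + 1) hok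
              rw [hto, ih (pvScanTo cs ']' (i1 + 1) + 1) _ q (by omega) hok']
              congr 3
              rw [show pvScanTo cs ']' (i1 + 1) + 1 - i1
                  = (pvScanTo cs ']' (i1 + 1) + 1 - (i1 + 1)) + 1 from by omega,
                List.take_succ_cons]
              simp
            · rw [if_neg hbk]
              by_cases hbs : cs[i1] = '\\'
              · rw [if_pos hbs]
                rw [pvOk, if_neg hsp, if_neg (by tauto), if_neg hlt, if_neg hbk,
                  if_pos hbs] at hok
                have hstep : pvStep (.ws, q, [], acc) cs[i1] = (.esc, q, [], acc) := by
                  rw [step_ws]; unfold pvDispatch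
                  rw [if_neg hsp, if_neg (by tauto), if_neg hlt, if_neg hbk, if_pos hbs]
                simp only [pvRun, List.foldl_cons, hstep]
                by_cases h2 : i1 + 1 < cs.length
                · rw [drop_cons_of_lt cs (i1 + 1) h2]
                  rw [drop_cons_of_lt cs (i1 + 1) h2, pvOk] at hok
                  simp only [pvRun, List.foldl_cons, step_esc]
                  rw [← pvRun, ih (i1 + 2) _ q (by omega) hok]
                  congr 3
                  rw [show List.take 2 (cs[i1] :: cs[i1 + 1] :: List.drop (i1 + 1 + 1) cs)
                      = [cs[i1], cs[i1 + 1]] from rfl, hbs]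
                · rw [drop_eq_nil_of_ge cs (i1 + 1) (by omega)]
                  simp only [pvRun, List.foldl_nil]
                  rw [pvLoopA.eq_def]
                  cases fuel with
                  | zero => omega
                  | succ fuel' =>
                    simp only [dif_neg (show ¬ i1 + 2 < cs.length from by omega)]
                    simp [pvFlush, hbs]
              · rw [if_neg hbs]
                by_cases hdot : cs[i1] = '.'
                · rw [if_pos hdot]
                  rw [pvOk, if_neg hsp, if_neg (by tauto), if_neg hlt, if_neg hbk,
                    if_neg hbs, if_pos hdot] at hok
                  have hstep : pvStep (.ws, q, [], acc) cs[i1] = (.ws, q, [], acc ++ ["."]) := by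
                    rw [step_ws]; unfold pvDispatch
                    rw [if_neg hsp, if_neg (by tauto), if_neg hlt, if_neg hbk, if_neg hbs,
                      if_pos hdot]
                  simp only [pvRun, List.foldl_cons, hstep]
                  rw [← pvRun, ih (i1 + 1) _ q (by omega) hok]
                · rw [if_neg hdot]
                  -- bare word: under Pre_ the first character is not a stray '>', ']' or '|'
                  have hstray : ¬ (cs[i1] = '>' ∨ cs[i1] = ']' ∨ cs[i1] = '|') := by
                    intro hcc
                    rw [pvOk, if_neg hsp, if_neg (by tauto), if_neg hlt, if_neg hbk,
                      if_neg hbs, if_neg hdot, if_pos hcc] at hok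
                    exact absurd hok (by decide)
                  rw [pvOk, if_neg hsp, if_neg (by tauto), if_neg hlt, if_neg hbk,
                    if_neg hbs, if_neg hdot, if_neg hstray] at hok
                  have hnb : cs[i1] ∉ pvBreakChars := by
                    simp only [pvBreakChars, List.mem_cons, List.not_mem_nil, or_false]
                    push_neg
                    exact ⟨hqc.1, hqc.2, hlt, fun h' => hstray (Or.inl h'), hbk,
                      fun h' => hstray (Or.inr (Or.inl h')), hdot, hbs,
                      fun h' => hstray (Or.inr (Or.inr h'))⟩
                  have hstep : pvStep (.ws, q, [], acc) cs[i1] = (.word, q, [cs[i1]], acc) := by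
                    rw [step_ws]; unfold pvDispatch
                    rw [if_neg hsp, if_neg (by tauto), if_neg hlt, if_neg hbk, if_neg hbs,
                      if_neg hdot, if_neg hstray]
                  simp only [pvRun, List.foldl_cons, hstep]
                  have hw := pvRun_word cs q (i1 + 1) [cs[i1]] acc
                  simp only [pvRun] at hw
                  rw [hw]
                  have hgej := pvScanWord_ge cs (i1 + 1)
                  have hsw : pvScanWord cs i1 = pvScanWord cs (i1 + 1) := by
                    rw [pvScanWord, dif_pos h1, if_pos ⟨hsp, hnb⟩]
                  have hok' : pvOk .top (cs.drop (pvScanWord cs (i1 + 1))) = true := by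
                    rw [← pvOk_word cs (i1 + 1)]; exact hok
                  rw [hsw, if_pos (show i1 < pvScanWord cs (i1 + 1) from by omega),
                    ih (pvScanWord cs (i1 + 1)) _ q (by omega) hok']
                  congr 3
                  rw [show pvScanWord cs (i1 + 1) - i1
                      = (pvScanWord cs (i1 + 1) - (i1 + 1)) + 1 from by omega,
                    List.take_succ_cons]
                  simp
      · simp only [dif_neg h1]
        rw [drop_eq_nil_of_ge cs i1 (by omega)]
        simp [pvRun, pvFlush]
    · simp only [dif_neg h]
      rw [drop_eq_nil_of_ge cs i (by omega)]
      simp [pvRun, pvFlush]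

-- ===== VERDICT (by name: the statement is the Claim_ definition above) =====
theorem parse_rhs_py_spec : Claim_equal_parse_rhs_py := by
  intro text _ hpre
  unfold Spec_parse_rhs_py parse_rhs_py parse_rhs_py_alt
  rw [pvLoopA_eq_run text.toList (text.toList.length + 1) 0 [] ' ' (by omega) hpre]
  simp [pvRun]
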